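-- pv_equiv track=rewrite | github.com/NVIDIA/NVFlare | nvflare/fuel/hci/security.py | get_identity_info
-- ===== SOURCE A (Python) =====
-- def get_identity_info(cert: dict):
--     """Gets the identity information from the provided certificate.
--
--     Args:
--         cert: certificate
--
--     Returns: if the cert is None, returning None.
--              if the cert is a dictinary, returning a dictionary containing three keys, common_name, organization and role.
--
--     """
--     if cert is None:
--         return None
--
--     cn = None
--     role = None
--     organization = None
--     for sub in cert.get("subject", ()):
--         for key, value in sub:
--             if key == "commonName":
--                 cn = value
--             elif key == "unstructuredName":
--                 role = value
--             elif key == "organizationName":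
--                 organization = value
--     return {"common_name": cn, "organization": organization, "role": role}
-- ===== SOURCE B (Python) =====
-- def get_identity_info(cert: dict):
--     if cert is None:
--         return None
--     pairs = [kv for sub in cert.get("subject", ()) for kv in sub]
--
--     def last_value(target):
--         for key, value in reversed(pairs):
--             if key == target:
--                 return value
--         return None
--
--     return {
--         "common_name": last_value("commonName"),
--         "organization": last_value("organizationName"),
--         "role": last_value("unstructuredName"),
--     }
-- ===== Notes on version B (the rewrite author's own statement) =====
-- stated objective: alternative
-- what changed: Instead of one forward pass mutating three accumulators through an if/elif chain, B flattens the subject pairs once and answers each key by a backwards first-match scan with early exit (last-write-wins equals first match from the end).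
import Mathlib
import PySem

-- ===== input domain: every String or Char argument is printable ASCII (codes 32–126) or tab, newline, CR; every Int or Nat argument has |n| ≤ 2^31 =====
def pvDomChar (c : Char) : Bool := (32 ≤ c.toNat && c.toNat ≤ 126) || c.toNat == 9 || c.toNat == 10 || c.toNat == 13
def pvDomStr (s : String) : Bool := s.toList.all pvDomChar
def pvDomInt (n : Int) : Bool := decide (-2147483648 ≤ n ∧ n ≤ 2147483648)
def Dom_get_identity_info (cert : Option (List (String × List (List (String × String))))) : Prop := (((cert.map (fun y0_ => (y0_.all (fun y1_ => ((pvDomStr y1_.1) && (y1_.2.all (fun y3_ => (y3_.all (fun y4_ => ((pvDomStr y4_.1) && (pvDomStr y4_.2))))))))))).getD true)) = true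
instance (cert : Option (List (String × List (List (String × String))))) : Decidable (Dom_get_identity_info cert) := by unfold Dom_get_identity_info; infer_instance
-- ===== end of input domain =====

-- B replaces A's single forward pass with three mutable accumulators by: flatten the
-- subject pairs once, then answer each key by a backwards first-match scan (objective: alternative).

-- ===== PORT A =====
-- state is (cn, role, organization), updated in A's branch order
def get_identity_info (cert : Option (List (String × List (List (String × String))))) : Option (List (String × Option String)) :=
  match cert with
  | none => none
  | some c =>
    let subject := ((c.find? (fun p => p.1 == "subject")).map (·.2)).getD []
    let s : Option String × Option String × Option String :=
      subject.foldl (fun st sub =>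
        sub.foldl (fun (st : Option String × Option String × Option String) kv =>
          if kv.1 == "commonName" then (some kv.2, st.2.1, st.2.2)
          else if kv.1 == "unstructuredName" then (st.1, some kv.2, st.2.2)
          else if kv.1 == "organizationName" then (st.1, st.2.1, some kv.2)
          else st) st) (none, none, none)
    some [("common_name", s.1), ("organization", s.2.2), ("role", s.2.1)]

-- ===== PORT B =====
def get_identity_info_alt (cert : Option (List (String × List (List (String × String))))) : Option (List (String × Option String)) :=
  match cert with
  | none => none
  | some c =>
    let subject := ((c.find? (fun p => p.1 == "subject")).map (·.2)).getD []
    let pairs := subject.flatMap (fun sub => sub)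
    let lastValue := fun (target : String) =>
      (pairs.reverse.find? (fun kv => kv.1 == target)).map (·.2)
    some [("common_name", lastValue "commonName"),
          ("organization", lastValue "organizationName"),
          ("role", lastValue "unstructuredName")]

-- ===== PRECONDITION & SPEC =====
def Spec_get_identity_info (cert : Option (List (String × List (List (String × String))))) (out : Option (List (String × Option String))) : Prop := out = get_identity_info_alt cert
instance (cert : Option (List (String × List (List (String × String))))) (out : Option (List (String × Option String))) : Decidable (Spec_get_identity_info cert out) := by unfold Spec_get_identity_info; infer_instance

-- ===== CLAIM (what is proved, stated in full; the proofs are below) =====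
def Claim_equal_get_identity_info : Prop := ∀ (cert : Option (List (String × List (List (String × String))))), Dom_get_identity_info cert → Spec_get_identity_info cert (get_identity_info cert)

-- ===== LEMMAS AND PROOFS =====

-- last value stored under key k in one sub (later pairs win)
def pvLast1 (sub : List (String × String)) (k : String) : Option String :=
  match sub with
  | [] => none
  | (k', v) :: t => (pvLast1 t k).or (if k' == k then some v else none)

-- last value stored under key k across all subs (later subs win)
def pvLastN (subs : List (List (String × String))) (k : String) : Option String :=
  match subs with
  | [] => none
  | sub :: t => (pvLastN t k).or (pvLast1 sub k)

theorem foldlA_inner (sub : List (String × String)) (st : Option String × Option String × Option String) :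
    sub.foldl (fun (st : Option String × Option String × Option String) kv =>
      if kv.1 == "commonName" then (some kv.2, st.2.1, st.2.2)
      else if kv.1 == "unstructuredName" then (st.1, some kv.2, st.2.2)
      else if kv.1 == "organizationName" then (st.1, st.2.1, some kv.2)
      else st) st
    = ((pvLast1 sub "commonName").or st.1,
       (pvLast1 sub "unstructuredName").or st.2.1,
       (pvLast1 sub "organizationName").or st.2.2) := by
  induction sub generalizing st with
  | nil => simp [pvLast1]
  | cons kv t ih =>
    obtain ⟨k, v⟩ := kv
    simp only [List.foldl_cons, ih, pvLast1, Option.or_assoc]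
    by_cases h1 : (k == "commonName") = true <;>
      by_cases h2 : (k == "unstructuredName") = true <;>
        by_cases h3 : (k == "organizationName") = true <;>
          simp_all

theorem foldlA_outer (subs : List (List (String × String))) (st : Option String × Option String × Option String) :
    subs.foldl (fun st sub =>
      sub.foldl (fun (st : Option String × Option String × Option String) kv =>
        if kv.1 == "commonName" then (some kv.2, st.2.1, st.2.2)
        else if kv.1 == "unstructuredName" then (st.1, some kv.2, st.2.2)
        else if kv.1 == "organizationName" then (st.1, st.2.1, some kv.2)
        else st) st) st
    = ((pvLastN subs "commonName").or st.1,
       (pvLastN subs "unstructuredName").or st.2.1,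
       (pvLastN subs "organizationName").or st.2.2) := by
  induction subs generalizing st with
  | nil => simp [pvLastN]
  | cons sub t ih =>
    simp only [List.foldl_cons]
    rw [foldlA_inner, ih]
    simp [pvLastN, Option.or_assoc]

-- first match from the end of one sub equals pvLast1
theorem find_rev_one (sub : List (String × String)) (k : String) :
    (sub.reverse.find? (fun kv => kv.1 == k)).map (·.2) = pvLast1 sub k := by
  induction sub with
  | nil => simp [pvLast1]
  | cons kv t ih =>
    obtain ⟨k', v⟩ := kv
    simp only [List.reverse_cons, List.find?_append, Option.map_or, ih, pvLast1]
    congr 1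
    by_cases h : (k' == k) = true <;> simp [List.find?, h]

-- first match from the end of the flattened pairs equals pvLastN
theorem find_rev_all (subs : List (List (String × String))) (k : String) :
    ((subs.flatMap (fun sub => sub)).reverse.find? (fun kv => kv.1 == k)).map (·.2)
    = pvLastN subs k := by
  induction subs with
  | nil => simp [pvLastN]
  | cons sub t ih =>
    simp only [List.flatMap_cons, List.reverse_append, List.find?_append, Option.map_or,
      ih, find_rev_one, pvLastN]

-- ===== VERDICT (by name: the statement is the Claim_ definition above) =====
theorem get_identity_info_spec : Claim_equal_get_identity_info := by
  intro cert _
  unfold Spec_get_identity_info get_identity_info get_identity_info_alt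
  match cert with
  | none => rfl
  | some c =>
    simp only [foldlA_outer, find_rev_all, Option.or_none]
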